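-- pv_equiv track=rewrite | github.com/sasa-misia/P-SLIP | psliptools/utilities/datetimes.py | _get_compatible_time_formats
-- ===== SOURCE A (Python) =====
-- DATETIME_NOT_FOUND_STRING = "Unable to infer date format"
--
-- def _get_compatible_time_formats(
--         time_str: str
--     ) -> list[str]:
--     """
--     Get a list of compatible time formats from a time string.
--
--     Args:
--         time_str (str): The time string to get compatible time formats from.
--
--     Returns:
--         list[str]: A list of compatible time formats.
--     """
--     time_sep = [x for x in time_str if not x.isdigit()]
--     if len(time_sep) == 1: # Found just hour and minute
--         time_formats = [f'%H{time_sep[0]}%M']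
--     elif len(time_sep) == 2: # Found hour, minute and second
--         time_formats = [f'%H{time_sep[0]}%M{time_sep[1]}%S']
--     else:
--         raise ValueError(f"{DATETIME_NOT_FOUND_STRING}. Time string with 0 or more than 2 separators: {time_str}")
--
--     return time_formats
-- ===== SOURCE B (Python) =====
-- DATETIME_NOT_FOUND_STRING = "Unable to infer date format"
--
-- def _get_compatible_time_formats(time_str: str) -> list[str]:
--     # Single-pass state machine: build the format incrementally, consuming a
--     # queue of field codes at each non-digit character; no separator list.
--     remaining = ['%M', '%S']
--     fmt = '%H'
--     for c in time_str:
--         if not c.isdigit():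
--             if not remaining:
--                 raise ValueError(f"{DATETIME_NOT_FOUND_STRING}. Time string with 0 or more than 2 separators: {time_str}")
--             fmt += c + remaining.pop(0)
--     if len(remaining) == 2:  # no separator found at all
--         raise ValueError(f"{DATETIME_NOT_FOUND_STRING}. Time string with 0 or more than 2 separators: {time_str}")
--     return [fmt]
-- ===== Notes on version B (the rewrite author's own statement) =====
-- stated objective: alternative
-- what changed: B is a single-pass state machine that builds the format string incrementally, consuming a queue of field codes ['%M','%S'] at each non-digit character (raising as soon as the queue is exhausted), instead of A's collect-the-separators list followed by a branch on its count with two hard-coded format literals.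
import Mathlib
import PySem

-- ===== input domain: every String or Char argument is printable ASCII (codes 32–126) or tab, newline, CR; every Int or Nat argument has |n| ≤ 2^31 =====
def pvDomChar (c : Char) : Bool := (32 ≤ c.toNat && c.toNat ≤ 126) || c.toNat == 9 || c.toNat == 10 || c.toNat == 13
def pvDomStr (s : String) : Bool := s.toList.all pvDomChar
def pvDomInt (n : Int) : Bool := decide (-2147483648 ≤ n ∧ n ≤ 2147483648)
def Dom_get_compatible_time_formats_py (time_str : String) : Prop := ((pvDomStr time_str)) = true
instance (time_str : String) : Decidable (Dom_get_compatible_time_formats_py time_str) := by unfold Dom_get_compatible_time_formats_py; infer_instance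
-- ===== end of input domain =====

-- B builds the format string in one pass, consuming a queue of field codes at each
-- non-digit character, instead of A's separator list + branch on its count (objective: alternative).

-- ===== PORT A =====
def get_compatible_time_formats_py (time_str : String) : List String :=
  let time_sep := time_str.toList.filter (fun c => !PySem.Chars.isdigit c)
  if time_sep.length = 1 then
    ["%H" ++ String.singleton time_sep[0]! ++ "%M"]
  else if time_sep.length = 2 then
    ["%H" ++ String.singleton time_sep[0]! ++ "%M" ++ String.singleton time_sep[1]! ++ "%S"]
  else
    []  -- ValueError in Python; excluded by Pre_

-- ===== PORT B =====
-- loop of Source B: state = (fmt, remaining field-code queue); none = ValueError raised mid-scan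
def get_compatible_time_formats_alt_go (cs : List Char) (fmt : String) (remaining : List String) :
    Option (String × List String) :=
  match cs with
  | [] => some (fmt, remaining)
  | c :: rest =>
    if !PySem.Chars.isdigit c then
      match remaining with
      | [] => none  -- raise ValueError (excluded by Pre_)
      | f :: rs => get_compatible_time_formats_alt_go rest (fmt ++ String.singleton c ++ f) rs
    else
      get_compatible_time_formats_alt_go rest fmt remaining

def get_compatible_time_formats_py_alt (time_str : String) : List String :=
  match get_compatible_time_formats_alt_go time_str.toList "%H" ["%M", "%S"] with
  | none => []  -- ValueError in Python; excluded by Pre_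
  | some (fmt, remaining) =>
    if remaining.length = 2 then []  -- no separator: ValueError in Python; excluded by Pre_
    else [fmt]

-- ===== PRECONDITION & SPEC =====
-- Pre_: exactly the inputs where Python A returns (1 or 2 non-digit characters); otherwise A raises ValueError.
def Pre_get_compatible_time_formats_py (time_str : String) : Prop :=
  (time_str.toList.filter (fun c => !PySem.Chars.isdigit c)).length = 1 ∨
  (time_str.toList.filter (fun c => !PySem.Chars.isdigit c)).length = 2

instance (time_str : String) : Decidable (Pre_get_compatible_time_formats_py time_str) := by
  unfold Pre_get_compatible_time_formats_py; infer_instance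

def pvWitness_get_compatible_time_formats_py : String := "12:34"

def Spec_get_compatible_time_formats_py (time_str : String) (out : List String) : Prop := out = get_compatible_time_formats_py_alt time_str
instance (time_str : String) (out : List String) : Decidable (Spec_get_compatible_time_formats_py time_str out) := by unfold Spec_get_compatible_time_formats_py; infer_instance

-- ===== CLAIM (what is proved, stated in full; the proofs are below) =====
def Claim_equal_get_compatible_time_formats_py : Prop := ∀ (time_str : String), Dom_get_compatible_time_formats_py time_str → Pre_get_compatible_time_formats_py time_str → Spec_get_compatible_time_formats_py time_str (get_compatible_time_formats_py time_str)

-- ===== LEMMAS AND PROOFS =====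

-- the string Source B's loop accumulates: separators interleaved with the field queue
def pvInterleave : List Char → List String → String
  | [], _ => ""
  | c :: cs, f :: fs => String.singleton c ++ f ++ pvInterleave cs fs
  | _ :: _, [] => ""  -- unreachable when enough fields remain

theorem go_characterize (cs : List Char) (fmt : String) (remaining : List String)
    (h : (cs.filter (fun c => !PySem.Chars.isdigit c)).length ≤ remaining.length) :
    get_compatible_time_formats_alt_go cs fmt remaining =
      some (fmt ++ pvInterleave (cs.filter (fun c => !PySem.Chars.isdigit c)) remaining,
            remaining.drop (cs.filter (fun c => !PySem.Chars.isdigit c)).length) := by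
  induction cs generalizing fmt remaining with
  | nil => simp [get_compatible_time_formats_alt_go, pvInterleave]
  | cons c rest ih =>
    by_cases hc : PySem.Chars.isdigit c
    · simpa [get_compatible_time_formats_alt_go, hc] using
        ih fmt remaining (by simpa [hc] using h)
    · match remaining with
      | [] => simp [hc] at h
      | f :: rs =>
        have h' : (rest.filter (fun c => !PySem.Chars.isdigit c)).length ≤ rs.length := by
          simpa [hc] using h
        have hf : List.filter (fun c => !PySem.Chars.isdigit c) (c :: rest)
            = c :: List.filter (fun c => !PySem.Chars.isdigit c) rest := by simp [hc]
        rw [get_compatible_time_formats_alt_go, if_pos (by simp [hc]), ih _ _ h']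
        simp [hf, pvInterleave]
        rw [← String.toList_inj]; simp

-- ===== VERDICT (by name: the statement is the Claim_ definition above) =====
theorem get_compatible_time_formats_py_spec : Claim_equal_get_compatible_time_formats_py := by
  intro s _ hpre
  unfold Spec_get_compatible_time_formats_py
  unfold get_compatible_time_formats_py get_compatible_time_formats_py_alt
  rcases hpre with h | h
  · obtain ⟨a, ha⟩ := List.length_eq_one_iff.mp h
    rw [go_characterize _ _ _ (by rw [ha]; simp)]
    simp [ha, pvInterleave]
    rw [← String.toList_inj]; simp
  · obtain ⟨a, b, hab⟩ := List.length_eq_two.mp h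
    rw [go_characterize _ _ _ (by rw [hab]; simp)]
    simp [hab, pvInterleave]
    rw [← String.toList_inj]; simp
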